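-- pv_equiv track=rewrite | github.com/DLR-SC/F2x | src/F2x/parser/plyplus/tree.py | _get_subroutine
-- ===== SOURCE A (Python) =====
-- def _get_subroutine(a_argument, a_src):
--     startIndex = 0
--     stopIndex =0
--     for i in range(len(a_src)):
--         l_str = a_src[i].strip()
--         if l_str.startswith("SUBROUTINE") and a_argument in l_str :
--             startIndex = i
--             for j, line in enumerate(a_src[i:]):
--                 line = line.strip()
--                 if line.startswith("END SUBROUTINE") :
--                     stopIndex = i + j
--                     break
--             break
--     else:
--         # should not happend
--         pass
--
--     return (startIndex, stopIndex)
-- ===== SOURCE B (Python) =====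
-- def _get_subroutine(a_argument, a_src):
--     startIndex = 0
--     stopIndex = 0
--     found = False
--     for i, line in enumerate(a_src):
--         l_str = line.strip()
--         if found:
--             if l_str.startswith("END SUBROUTINE"):
--                 stopIndex = i
--                 break
--         elif l_str.startswith("SUBROUTINE") and a_argument in l_str:
--             startIndex = i
--             found = True
--     return (startIndex, stopIndex)
-- ===== Notes on version B (the rewrite author's own statement) =====
-- stated objective: simpler
-- what changed: Replaced the nested scan (outer index loop plus a second enumerate over the suffix a_src[i:]) by a single linear pass with a boolean 'found' state that switches from matching the SUBROUTINE header to matching the END SUBROUTINE line.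
import Mathlib
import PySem

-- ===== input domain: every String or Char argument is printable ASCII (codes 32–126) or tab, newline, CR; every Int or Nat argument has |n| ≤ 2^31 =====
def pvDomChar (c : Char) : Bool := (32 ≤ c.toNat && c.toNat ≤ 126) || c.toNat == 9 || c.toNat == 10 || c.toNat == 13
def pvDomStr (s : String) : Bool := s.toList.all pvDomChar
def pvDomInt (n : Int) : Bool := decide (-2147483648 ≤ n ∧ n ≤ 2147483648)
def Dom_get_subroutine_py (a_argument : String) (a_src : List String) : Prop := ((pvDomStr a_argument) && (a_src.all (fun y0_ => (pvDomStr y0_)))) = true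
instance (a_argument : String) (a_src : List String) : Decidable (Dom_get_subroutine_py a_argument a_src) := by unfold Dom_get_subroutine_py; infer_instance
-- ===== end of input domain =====

-- B replaces A's nested scan (outer index loop + enumerate over the suffix a_src[i:]) by one
-- linear pass with a boolean 'found' state; objective: simpler (one loop instead of two).

-- ===== PORT A =====
-- inner loop: 'for j, line in enumerate(a_src[i:]): … if startswith END SUBROUTINE: stopIndex = i+j; break'
-- (stopIndex stays 0 when no line matches)
def pvFindEndA (i j : Int) : List String → Int
  | [] => 0
  | l :: rest =>
    if PySem.Str.startswith (PySem.Str.strip l) "END SUBROUTINE" then i + j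
    else pvFindEndA i (j + 1) rest

-- outer loop: 'for i in range(len(a_src)): …' as structural recursion over the list with index i;
-- the suffix a_src[i:] handed to the inner loop is exactly the current cons cell l :: rest
def pvGoA (a_argument : String) (i : Int) : List String → Int × Int
  | [] => (0, 0)
  | l :: rest =>
    let l_str := PySem.Str.strip l
    if PySem.Str.startswith l_str "SUBROUTINE" && PySem.Str.isIn a_argument l_str then
      (i, pvFindEndA i 0 (l :: rest))
    else pvGoA a_argument (i + 1) rest

def get_subroutine_py (a_argument : String) (a_src : List String) : Int × Int :=
  pvGoA a_argument 0 a_src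

-- ===== PORT B =====
-- single pass with state (startIndex, found)
def pvGoB (a_argument : String) (i start : Int) (found : Bool) : List String → Int × Int
  | [] => (start, 0)
  | l :: rest =>
    let l_str := PySem.Str.strip l
    if found then
      if PySem.Str.startswith l_str "END SUBROUTINE" then (start, i)
      else pvGoB a_argument (i + 1) start true rest
    else if PySem.Str.startswith l_str "SUBROUTINE" && PySem.Str.isIn a_argument l_str then
      pvGoB a_argument (i + 1) i true rest
    else pvGoB a_argument (i + 1) start false rest

def get_subroutine_py_alt (a_argument : String) (a_src : List String) : Int × Int :=
  pvGoB a_argument 0 0 false a_src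

-- ===== PRECONDITION & SPEC =====
def Spec_get_subroutine_py (a_argument : String) (a_src : List String) (out : Int × Int) : Prop := out = get_subroutine_py_alt a_argument a_src
instance (a_argument : String) (a_src : List String) (out : Int × Int) : Decidable (Spec_get_subroutine_py a_argument a_src out) := by unfold Spec_get_subroutine_py; infer_instance

-- ===== CLAIM (what is proved, stated in full; the proofs are below) =====
def Claim_equal_get_subroutine_py : Prop := ∀ (a_argument : String) (a_src : List String), Dom_get_subroutine_py a_argument a_src → Spec_get_subroutine_py a_argument a_src (get_subroutine_py a_argument a_src)

-- ===== LEMMAS AND PROOFS =====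

-- a stripped line cannot start with both "SUBROUTINE" and "END SUBROUTINE"
lemma pv_disjoint (s : String) (h : PySem.Str.startswith s "SUBROUTINE" = true) :
    PySem.Str.startswith s "END SUBROUTINE" = false := by
  simp only [PySem.Str.startswith_eq] at h ⊢
  rw [PySem.Chars.startswith_iff] at h
  rw [Bool.eq_false_iff, Ne, PySem.Chars.startswith_iff]
  intro h2
  obtain ⟨t, ht⟩ := h
  obtain ⟨u, hu⟩ := h2
  rw [← ht] at hu
  have e1 : "END SUBROUTINE".toList = ['E','N','D',' ','S','U','B','R','O','U','T','I','N','E'] := rfl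
  have e2 : "SUBROUTINE".toList = ['S','U','B','R','O','U','T','I','N','E'] := rfl
  rw [e1, e2] at hu
  simp at hu

-- once found, B's remaining pass computes exactly A's inner END-scan
lemma pvGoB_found (a_argument : String) (start : Int) :
    ∀ (rest : List String) (i j : Int),
      pvGoB a_argument (i + j) start true rest = (start, pvFindEndA i j rest) := by
  intro rest
  induction rest with
  | nil => intro i j; simp [pvGoB, pvFindEndA]
  | cons l t ih =>
    intro i j
    rw [pvGoB, pvFindEndA, if_pos rfl]
    split
    · rfl
    · have h2 : i + j + 1 = i + (j + 1) := by ring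
      rw [h2, ih i (j + 1)]

lemma pv_main (a_argument : String) :
    ∀ (xs : List String) (i : Int),
      pvGoB a_argument i 0 false xs = pvGoA a_argument i xs := by
  intro xs
  induction xs with
  | nil => intro i; rfl
  | cons l t ih =>
    intro i
    rw [pvGoB, pvGoA, if_neg (by simp)]
    split
    · rename_i h
      have hsub : PySem.Str.startswith (PySem.Str.strip l) "SUBROUTINE" = true :=
        ((Bool.and_eq_true _ _).mp h).1
      have hend := pv_disjoint _ hsub
      rw [show pvFindEndA i 0 (l :: t) = pvFindEndA i 1 t by
            rw [pvFindEndA, if_neg (by rw [hend]; simp)]; norm_num]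
      have := pvGoB_found a_argument i t i 1
      simpa using this
    · exact ih (i + 1)

-- ===== VERDICT (by name: the statement is the Claim_ definition above) =====
theorem get_subroutine_py_spec : Claim_equal_get_subroutine_py := by
  intro a_argument a_src _
  unfold Spec_get_subroutine_py get_subroutine_py get_subroutine_py_alt
  exact (pv_main a_argument a_src 0).symm
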